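-- pv_equiv track=rewrite | github.com/natechensan/ClawCare | clawcare/guard/scanner.py | _segment_for_position
-- ===== SOURCE A (Python) =====
-- def _segment_for_position(cmd: str, pos: int, spans: list[tuple[int, int]]) -> str:
--     """Return the command segment (split on &&, ||, ;, |) containing *pos*.
--
--     Only splits on operators that are outside quoted strings.
--     """
--     # Find split points outside quotes
--     splits: list[int] = [0]
--     i = 0
--     while i < len(cmd):
--         # Skip over quoted spans
--         in_quote = False
--         for qs, qe in spans:
--             if qs <= i < qe:
--                 i = qe
--                 in_quote = True
--                 break
--         if in_quote:
--             continue
--         # Check for compound operators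
--         ch = cmd[i]
--         if ch == ";":
--             splits.append(i + 1)
--         elif ch == "|" and i + 1 < len(cmd) and cmd[i + 1] == "|":
--             splits.append(i + 2)
--             i += 2
--             continue
--         elif ch == "|":
--             splits.append(i + 1)
--         elif ch == "&" and i + 1 < len(cmd) and cmd[i + 1] == "&":
--             splits.append(i + 2)
--             i += 2
--             continue
--         i += 1
--     splits.append(len(cmd))
--
--     # Find which segment contains pos
--     for j in range(len(splits) - 1):
--         if splits[j] <= pos < splits[j + 1]:
--             return cmd[splits[j] : splits[j + 1]].strip()
--     return cmd.strip()
-- ===== SOURCE B (Python) =====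
-- def _segment_for_position(cmd: str, pos: int, spans: list[tuple[int, int]]) -> str:
--     """Return the command segment (split on &&, ||, ;, |) containing *pos*.
--
--     One pass: a difference array built from *spans* gives, via a running
--     prefix sum, whether each index is inside a quoted span, so the scan over
--     *cmd* never re-examines the span list (O(n + m) instead of O(n * m)).
--     """
--     n = len(cmd)
--     delta = [0] * (n + 1)
--     for qs, qe in spans:
--         lo = max(qs, 0)
--         hi = min(qe, n)
--         if lo < hi:
--             delta[lo] += 1
--             delta[hi] -= 1
--     covered = []
--     depth = 0
--     for d in delta[:n]:
--         depth += d
--         covered.append(depth > 0)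
--
--     splits = [0]
--     skip = 0
--     for i, ch in enumerate(cmd):
--         if skip:
--             skip -= 1
--             continue
--         if covered[i]:
--             continue
--         if ch == ";":
--             splits.append(i + 1)
--         elif ch == "|" and i + 1 < n and cmd[i + 1] == "|":
--             splits.append(i + 2)
--             skip = 1
--         elif ch == "|":
--             splits.append(i + 1)
--         elif ch == "&" and i + 1 < n and cmd[i + 1] == "&":
--             splits.append(i + 2)
--             skip = 1
--     splits.append(n)
--
--     for a, b in zip(splits, splits[1:]):
--         if a <= pos < b:
--             return cmd[a:b].strip()
--     return cmd.strip()
-- ===== Notes on version B (the rewrite author's own statement) =====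
-- stated objective: faster
-- what changed: Replaces the per-position inner scan over the span list (and the jump-to-span-end control flow) by a difference array whose running prefix sum marks quoted positions once, so the command is scanned in a single for-pass with a skip counter, and segment selection walks consecutive split pairs.
import Mathlib
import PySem

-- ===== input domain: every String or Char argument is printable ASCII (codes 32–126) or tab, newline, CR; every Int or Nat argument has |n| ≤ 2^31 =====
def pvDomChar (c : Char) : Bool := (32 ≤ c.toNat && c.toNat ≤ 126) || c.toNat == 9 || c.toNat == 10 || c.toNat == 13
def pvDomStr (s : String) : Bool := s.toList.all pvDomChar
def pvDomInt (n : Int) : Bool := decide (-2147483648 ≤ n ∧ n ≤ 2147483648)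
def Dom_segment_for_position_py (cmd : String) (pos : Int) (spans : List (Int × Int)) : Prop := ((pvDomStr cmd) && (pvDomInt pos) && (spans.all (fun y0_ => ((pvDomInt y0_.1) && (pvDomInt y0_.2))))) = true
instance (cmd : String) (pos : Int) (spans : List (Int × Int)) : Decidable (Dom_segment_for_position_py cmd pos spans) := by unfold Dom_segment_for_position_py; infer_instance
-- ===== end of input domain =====

-- B replaces A's per-position scan over the span list by a difference array (prefix sums mark
-- quoted positions once) and a single for-pass with a skip counter: O(n+m) instead of O(n*m).

-- ===== PORT A =====
-- the inner 'for qs, qe in spans: if qs <= i < qe: break' loop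
def segA_find (spans : List (Int × Int)) (i : Nat) : Option (Int × Int) :=
  spans.find? (fun q => decide (q.1 ≤ (i : Int) ∧ (i : Int) < q.2))

-- the 'while i < len(cmd)' split-collection loop of A
def segA_loop (cs : List Char) (spans : List (Int × Int)) (i : Nat) (splits : List Int) :
    List Int :=
  if hin : i < cs.length then
    match hq : segA_find spans i with
    | some q => segA_loop cs spans q.2.toNat splits
    | none =>
      let ch := cs[i]
      if ch = ';' then segA_loop cs spans (i + 1) (splits ++ [(i : Int) + 1])
      else if ch = '|' ∧ i + 1 < cs.length ∧ cs[i+1]? = some '|' then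
        segA_loop cs spans (i + 2) (splits ++ [(i : Int) + 2])
      else if ch = '|' then segA_loop cs spans (i + 1) (splits ++ [(i : Int) + 1])
      else if ch = '&' ∧ i + 1 < cs.length ∧ cs[i+1]? = some '&' then
        segA_loop cs spans (i + 2) (splits ++ [(i : Int) + 2])
      else segA_loop cs spans (i + 1) splits
  else splits
termination_by cs.length - i
decreasing_by
  · have h := List.find?_some hq
    simp only [decide_eq_true_eq] at h
    omega
  all_goals omega

-- the 'for j in range(len(splits) - 1)' selection loop of A
def segA_pick (cmd : String) (pos : Int) (splits : List Int) (j : Nat) : String :=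
  if hin : j + 1 < splits.length then
    if splits.getD j 0 ≤ pos ∧ pos < splits.getD (j + 1) 0 then
      PySem.Str.strip (PySem.Str.slice cmd (some (splits.getD j 0)) (some (splits.getD (j + 1) 0)))
    else segA_pick cmd pos splits (j + 1)
  else PySem.Str.strip cmd
termination_by splits.length - j

def segment_for_position_py (cmd : String) (pos : Int) (spans : List (Int × Int)) : String :=
  let cs := cmd.toList
  let splits := segA_loop cs spans 0 [0] ++ [(cs.length : Int)]
  segA_pick cmd pos splits 0

-- ===== PORT B =====
-- 'for qs, qe in spans: delta[lo] += 1; delta[hi] -= 1' (indices always in range: 0 ≤ lo ≤ hi ≤ n)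
def segB_mark (n : Nat) (spans : List (Int × Int)) (delta : List Int) : List Int :=
  spans.foldl (fun d q =>
    let lo := max q.1 0
    let hi := min q.2 (n : Int)
    if lo < hi then
      let d1 := d.set lo.toNat (d.getD lo.toNat 0 + 1)
      d1.set hi.toNat (d1.getD hi.toNat 0 - 1)
    else d) delta

-- 'depth += d; covered.append(depth > 0)' running prefix sum
def segB_covered (delta : List Int) (n : Nat) : List Bool :=
  ((delta.take n).foldl (fun (st : Int × List Bool) d =>
    (st.1 + d, st.2 ++ [decide (0 < st.1 + d)])) (0, [])).2

-- body of the 'for i, ch in enumerate(cmd)' loop; state = (skip, splits)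
def segB_step (cs : List Char) (cov : List Bool) (st : Nat × List Int) (p : Int × Char) :
    Nat × List Int :=
  if st.1 ≠ 0 then (st.1 - 1, st.2)
  else if cov.getD p.1.toNat false then (0, st.2)
  else if p.2 = ';' then (0, st.2 ++ [p.1 + 1])
  else if p.2 = '|' ∧ p.1 + 1 < (cs.length : Int) ∧ cs[p.1.toNat + 1]? = some '|' then
    (1, st.2 ++ [p.1 + 2])
  else if p.2 = '|' then (0, st.2 ++ [p.1 + 1])
  else if p.2 = '&' ∧ p.1 + 1 < (cs.length : Int) ∧ cs[p.1.toNat + 1]? = some '&' then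
    (1, st.2 ++ [p.1 + 2])
  else (0, st.2)

-- 'for a, b in zip(splits, splits[1:])'
def segB_pick (cmd : String) (pos : Int) : List (Int × Int) → String
  | [] => PySem.Str.strip cmd
  | (a, b) :: rest =>
      if a ≤ pos ∧ pos < b then PySem.Str.strip (PySem.Str.slice cmd (some a) (some b))
      else segB_pick cmd pos rest

def segment_for_position_py_alt (cmd : String) (pos : Int) (spans : List (Int × Int)) : String :=
  let cs := cmd.toList
  let n := cs.length
  let delta := segB_mark n spans (List.replicate (n + 1) 0)
  let cov := segB_covered delta n
  let splits := ((PySem.List.enumerate cs 0).foldl (segB_step cs cov) (0, [0])).2 ++ [(n : Int)]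
  segB_pick cmd pos (splits.zip splits.tail)

-- ===== PRECONDITION & SPEC =====
def Spec_segment_for_position_py (cmd : String) (pos : Int) (spans : List (Int × Int)) (out : String) : Prop := out = segment_for_position_py_alt cmd pos spans
instance (cmd : String) (pos : Int) (spans : List (Int × Int)) (out : String) : Decidable (Spec_segment_for_position_py cmd pos spans out) := by unfold Spec_segment_for_position_py; infer_instance

-- ===== CLAIM (what is proved, stated in full; the proofs are below) =====
def Claim_equal_segment_for_position_py : Prop := ∀ (cmd : String) (pos : Int) (spans : List (Int × Int)), Dom_segment_for_position_py cmd pos spans → Spec_segment_for_position_py cmd pos spans (segment_for_position_py cmd pos spans)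

-- ===== LEMMAS AND PROOFS =====


-- covered-predicate: 'any span contains i'
def segCovP (spans : List (Int × Int)) (i : Nat) : Bool :=
  spans.any (fun q => decide (q.1 ≤ (i : Int) ∧ (i : Int) < q.2))

-- reference loop: like A's while-loop but stepping one position at a time through quoted spans
def segF (cs : List Char) (spans : List (Int × Int)) (i : Nat) (splits : List Int) : List Int :=
  if hin : i < cs.length then
    if segCovP spans i then segF cs spans (i + 1) splits
    else
      let ch := cs[i]
      if ch = ';' then segF cs spans (i + 1) (splits ++ [(i : Int) + 1])
      else if ch = '|' ∧ i + 1 < cs.length ∧ cs[i+1]? = some '|' then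
        segF cs spans (i + 2) (splits ++ [(i : Int) + 2])
      else if ch = '|' then segF cs spans (i + 1) (splits ++ [(i : Int) + 1])
      else if ch = '&' ∧ i + 1 < cs.length ∧ cs[i+1]? = some '&' then
        segF cs spans (i + 2) (splits ++ [(i : Int) + 2])
      else segF cs spans (i + 1) splits
  else splits
termination_by cs.length - i

theorem segF_terminal (cs : List Char) (spans : List (Int × Int)) (i : Nat) (splits : List Int)
    (h : cs.length ≤ i) : segF cs spans i splits = splits := by
  unfold segF; rw [dif_neg (by omega)]

-- stepping through a fully covered block [i, e) does not change segF
theorem segF_chain (cs : List Char) (spans : List (Int × Int)) (splits : List Int) :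
    ∀ (k i e : Nat), e - i ≤ k → i ≤ e →
      (∀ j, i ≤ j → j < e → segCovP spans j = true) →
      segF cs spans i splits = segF cs spans e splits := by
  intro k
  induction k with
  | zero =>
    intro i e h1 h2 _
    have h : i = e := by omega
    rw [h]
  | succ k ih =>
    intro i e h1 h2 hcov
    by_cases hie : i = e
    · rw [hie]
    · have hlt : i < e := by omega
      have hci : segCovP spans i = true := hcov i le_rfl hlt
      by_cases hin : i < cs.length
      · have heq : segF cs spans i splits = segF cs spans (i + 1) splits := by
          conv_lhs => rw [segF]
          rw [dif_pos hin, if_pos hci]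
        rw [heq]
        exact ih (i+1) e (by omega) (by omega) (fun j hj1 hj2 => hcov j (by omega) hj2)
      · rw [segF_terminal cs spans i splits (by omega),
            segF_terminal cs spans e splits (by omega)]

-- A's loop equals the reference loop
theorem segA_eq_segF (cs : List Char) (spans : List (Int × Int)) :
    ∀ (k i : Nat) (splits : List Int), cs.length - i ≤ k →
      segA_loop cs spans i splits = segF cs spans i splits := by
  intro k
  induction k with
  | zero =>
    intro i splits h
    rw [segF_terminal cs spans i splits (by omega)]
    unfold segA_loop
    rw [dif_neg (by omega)]
  | succ k ih =>
    intro i splits h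
    by_cases hin : i < cs.length
    · conv_lhs => rw [segA_loop]
      rw [dif_pos hin]
      split
      · rename_i q hq
        have hp := List.find?_some hq
        have hmem := List.mem_of_find?_eq_some hq
        simp only [decide_eq_true_eq] at hp
        have he : i < q.2.toNat := by omega
        rw [ih q.2.toNat splits (by omega)]
        refine (segF_chain cs spans splits (q.2.toNat - i) i q.2.toNat (by omega) (by omega)
          (fun j hj1 hj2 => ?_)).symm
        simp only [segCovP, List.any_eq_true]
        exact ⟨q, hmem, by simp only [decide_eq_true_eq]; omega⟩
      · rename_i hq
        have hcov : segCovP spans i = false := by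
          simp only [segCovP, List.any_eq_false]
          intro q hqmem
          have := List.find?_eq_none.mp hq q hqmem
          simpa using this
        conv_rhs => rw [segF]
        conv_rhs => rw [dif_pos hin]
        simp only [hcov, Bool.false_eq_true, if_false]
        split_ifs
        · exact ih (i + 1) _ (by omega)
        · exact ih (i + 2) _ (by omega)
        · exact ih (i + 1) _ (by omega)
        · exact ih (i + 2) _ (by omega)
        · exact ih (i + 1) _ (by omega)
    · rw [segF_terminal cs spans i splits (by omega)]
      unfold segA_loop
      rw [dif_neg (by omega)]

-- B's fold over the enumerate suffix equals the reference loop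
theorem segB_eq_segF (cs : List Char) (spans : List (Int × Int)) (cov : List Bool)
    (hcov : ∀ j, j < cs.length → cov.getD j false = segCovP spans j) :
    ∀ (k i : Nat) (splits : List Int), cs.length - i ≤ k →
      ((PySem.List.enumerate (cs.drop i) (i : Int)).foldl (segB_step cs cov) (0, splits)).2
        = segF cs spans i splits := by
  intro k
  induction k with
  | zero =>
    intro i splits h
    rw [segF_terminal cs spans i splits (by omega), List.drop_eq_nil_of_le (by omega)]
    rfl
  | succ k ih =>
    intro i splits h
    by_cases hin : i < cs.length
    · rw [List.drop_eq_getElem_cons hin, PySem.List.enumerate_cons, List.foldl_cons,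
        show ((i : Int) + 1) = ((i + 1 : Nat) : Int) by push_cast; ring]
      conv_rhs => rw [segF]
      rw [dif_pos hin]
      simp only [segB_step, ← Nat.cast_add_one, Nat.cast_lt, Int.toNat_natCast,
        hcov i hin]
      simp only [show (0 : Nat) ≠ 0 ↔ False by simp, if_false]
      by_cases hc : segCovP spans i = true
      · rw [if_pos hc, hc]
        simp only [if_true]
        exact ih (i + 1) splits (by omega)
      · rw [if_neg hc, eq_false_of_ne_true hc]
        simp only [Bool.false_eq_true, if_false]
        split_ifs with h1 h2 h3 h4
        · exact ih (i + 1) _ (by omega)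
        · obtain ⟨-, h2b, -⟩ := h2
          rw [List.drop_eq_getElem_cons h2b, PySem.List.enumerate_cons, List.foldl_cons,
            show ((i + 1 : Nat) : Int) + 1 = ((i + 2 : Nat) : Int) by push_cast; ring]
          have hskip : segB_step cs cov (1, splits ++ [(i : Int) + 2]) ((i + 1 : Nat), cs[i + 1]'h2b)
              = (0, splits ++ [(i : Int) + 2]) := by
            simp [segB_step]
          rw [hskip]
          exact ih (i + 2) _ (by omega)
        · exact ih (i + 1) _ (by omega)
        · obtain ⟨-, h4b, -⟩ := h4
          rw [List.drop_eq_getElem_cons h4b, PySem.List.enumerate_cons, List.foldl_cons,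
            show ((i + 1 : Nat) : Int) + 1 = ((i + 2 : Nat) : Int) by push_cast; ring]
          have hskip : segB_step cs cov (1, splits ++ [(i : Int) + 2]) ((i + 1 : Nat), cs[i + 1]'h4b)
              = (0, splits ++ [(i : Int) + 2]) := by
            simp [segB_step]
          rw [hskip]
          exact ih (i + 2) _ (by omega)
        · exact ih (i + 1) _ (by omega)
    · rw [segF_terminal cs spans i splits (by omega), List.drop_eq_nil_of_le (by omega)]
      rfl

-- prefix-sum of a set-increment
theorem sum_take_set (d : List Int) :
    ∀ (l m : Nat) (c : Int), l < d.length →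
      ((d.set l (d.getD l 0 + c)).take m).sum = (d.take m).sum + (if l < m then c else 0) := by
  induction d with
  | nil => intro l m c h; simp at h
  | cons x xs ih =>
    intro l m c h
    cases l with
    | zero =>
      cases m with
      | zero => simp
      | succ m => simp [List.take_succ_cons]; ring
    | succ l =>
      cases m with
      | zero => simp
      | succ m =>
        simp only [List.set_cons_succ, List.take_succ_cons, List.sum_cons, List.getD_cons_succ]
        rw [ih l m c (by simpa using h)]
        simp
        ring

-- the marking fold adds, to each prefix sum at i < n, the number of spans covering i
theorem segB_mark_sum (n : Nat) :
    ∀ (spans : List (Int × Int)) (d : List Int), d.length = n + 1 →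
      ∀ i, i < n →
        ((segB_mark n spans d).take (i + 1)).sum
          = (d.take (i + 1)).sum
            + ((spans.countP (fun q => decide (q.1 ≤ (i : Int) ∧ (i : Int) < q.2)) : Nat) : Int) := by
  intro spans
  induction spans with
  | nil => intro d hd i hi; simp [segB_mark]
  | cons q spans ih =>
    intro d hd i hi
    have hbody : ∀ e : List Int, e.length = n + 1 →
        ((if max q.1 0 < min q.2 (n : Int) then
            ((e.set (max q.1 0).toNat (e.getD (max q.1 0).toNat 0 + 1)).set
              (min q.2 (n : Int)).toNat
              ((e.set (max q.1 0).toNat (e.getD (max q.1 0).toNat 0 + 1)).getD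
                (min q.2 (n : Int)).toNat 0 - 1))
          else e).take (i + 1)).sum
          = (e.take (i + 1)).sum + (if q.1 ≤ (i : Int) ∧ (i : Int) < q.2 then 1 else 0) := by
      intro e he
      by_cases hlh : max q.1 0 < min q.2 (n : Int)
      · rw [if_pos hlh]
        simp only [sub_eq_add_neg]
        rw [sum_take_set _ _ _ (-1) (by simp [List.length_set]; omega),
            sum_take_set _ _ _ 1 (by omega)]
        split_ifs <;> omega
      · rw [if_neg hlh]
        split_ifs with hcv
        · omega
        · ring
    have hlen : ∀ e : List Int, e.length = n + 1 →
        ((if max q.1 0 < min q.2 (n : Int) then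
            ((e.set (max q.1 0).toNat (e.getD (max q.1 0).toNat 0 + 1)).set
              (min q.2 (n : Int)).toNat
              ((e.set (max q.1 0).toNat (e.getD (max q.1 0).toNat 0 + 1)).getD
                (min q.2 (n : Int)).toNat 0 - 1))
          else e) : List Int).length = n + 1 := by
      intro e he
      split_ifs <;> simp [List.length_set, he]
    simp only [segB_mark, List.foldl_cons] at *
    rw [ih _ (hlen d hd) i hi, hbody d hd, List.countP_cons]
    by_cases hcv : q.1 ≤ (i : Int) ∧ (i : Int) < q.2
    · simp [hcv]
      ring
    · simp [hcv]

-- segB_mark preserves the length of the difference array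
theorem segB_mark_length (n : Nat) :
    ∀ (spans : List (Int × Int)) (d : List Int), (segB_mark n spans d).length = d.length := by
  intro spans
  induction spans with
  | nil => intro d; simp [segB_mark]
  | cons q spans ih =>
    intro d
    simp only [segB_mark, List.foldl_cons] at *
    rw [ih]
    split_ifs <;> simp [List.length_set]

-- shape of the running-prefix-sum fold
theorem segB_covered_fold :
    ∀ (ds : List Int) (s : Int) (acc : List Bool),
      ((ds.foldl (fun (st : Int × List Bool) d =>
          (st.1 + d, st.2 ++ [decide (0 < st.1 + d)])) (s, acc)).2)
        = acc ++ (List.range ds.length).map (fun k => decide (0 < s + ((ds.take (k + 1)).sum))) := by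
  intro ds
  induction ds with
  | nil => intro s acc; simp
  | cons d ds ih =>
    intro s acc
    simp only [List.foldl_cons]
    rw [ih (s + d) (acc ++ [decide (0 < s + d)])]
    rw [List.length_cons, List.range_succ_eq_map, List.map_cons, List.map_map]
    simp only [List.take_succ_cons, List.sum_cons, List.append_assoc, List.singleton_append]
    congr 2
    · simp
    · apply List.map_congr_left
      intro k _
      simp [Function.comp, add_assoc]

-- the covered array computed by B agrees with the covered predicate
theorem segB_cov_spec (n : Nat) (spans : List (Int × Int)) :
    ∀ j, j < n →
      (segB_covered (segB_mark n spans (List.replicate (n + 1) 0)) n).getD j false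
        = segCovP spans j := by
  intro j hj
  have hlen : (segB_mark n spans (List.replicate (n + 1) 0)).length = n + 1 := by
    rw [segB_mark_length]; simp
  unfold segB_covered
  rw [segB_covered_fold]
  have hlen2 : ((segB_mark n spans (List.replicate (n + 1) 0)).take n).length = n := by
    simp [hlen]
  rw [List.nil_append]
  have hget : ∀ (g : Nat → Bool), ((List.range n).map g).getD j false = g j := by
    intro g
    rw [List.getD_eq_getElem?_getD, List.getElem?_map, List.getElem?_range hj]
    rfl
  rw [hlen2, hget]
  rw [List.take_take, show min (j + 1) n = j + 1 by omega]
  rw [segB_mark_sum n spans _ (by simp) j hj]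
  have hz : ((List.replicate (n + 1) (0 : Int)).take (j + 1)).sum = 0 := by
    rw [List.take_replicate]
    simp
  rw [hz]
  by_cases hc : segCovP spans j = true
  · rw [hc]
    simp only [segCovP, List.any_eq_true] at hc
    have : 0 < spans.countP (fun q => decide (q.1 ≤ (j : Int) ∧ (j : Int) < q.2)) :=
      List.countP_pos_iff.mpr hc
    simp only [decide_eq_true_eq]
    omega
  · rw [eq_false_of_ne_true hc]
    simp only [segCovP, List.any_eq_true] at hc
    push Not at hc
    have : spans.countP (fun q => decide (q.1 ≤ (j : Int) ∧ (j : Int) < q.2)) = 0 := by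
      rw [List.countP_eq_zero]
      intro q hq
      exact hc q hq
    rw [this]
    simp

-- A's indexed selection loop equals B's pair-list selection loop
theorem segA_pick_eq (cmd : String) (pos : Int) :
    ∀ (k : Nat) (l : List Int) (j : Nat), l.length - j ≤ k →
      segA_pick cmd pos l j = segB_pick cmd pos ((l.drop j).zip (l.drop j).tail) := by
  intro k
  induction k with
  | zero =>
    intro l j h
    unfold segA_pick
    rw [dif_neg (by omega)]
    have hd : (l.drop j).tail = [] := by
      rw [List.tail_drop]
      exact List.drop_eq_nil_of_le (by omega)
    rw [hd, List.zip_nil_right]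
    rfl
  | succ k ih =>
    intro l j h
    by_cases hin : j + 1 < l.length
    · unfold segA_pick
      rw [dif_pos hin]
      have hd1 : l.drop j = l[j] :: l.drop (j + 1) := List.drop_eq_getElem_cons (by omega)
      have hd2 : l.drop (j + 1) = l[j + 1] :: l.drop (j + 2) := List.drop_eq_getElem_cons hin
      rw [List.tail_drop, hd1, hd2, List.zip_cons_cons]
      rw [List.getD_eq_getElem l 0 (by omega), List.getD_eq_getElem l 0 hin]
      unfold segB_pick
      split_ifs with hcmp
      · rfl
      · rw [ih l (j + 1) (by omega), List.tail_drop, hd2]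
    · unfold segA_pick
      rw [dif_neg (by omega)]
      have hd : (l.drop j).tail = [] := by
        rw [List.tail_drop]
        exact List.drop_eq_nil_of_le (by omega)
      rw [hd, List.zip_nil_right]
      rfl

theorem segA_pick_eq0 (cmd : String) (pos : Int) (l : List Int) :
    segA_pick cmd pos l 0 = segB_pick cmd pos (l.zip l.tail) := by
  have h := segA_pick_eq cmd pos l.length l 0 (by omega)
  simpa using h

theorem segment_for_position_py_spec : Claim_equal_segment_for_position_py := by
  intro cmd pos spans _
  unfold Spec_segment_for_position_py segment_for_position_py segment_for_position_py_alt
  dsimp only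
  have hcov : ∀ j, j < cmd.toList.length →
      (segB_covered (segB_mark cmd.toList.length spans
        (List.replicate (cmd.toList.length + 1) 0)) cmd.toList.length).getD j false
        = segCovP spans j :=
    fun j hj => segB_cov_spec cmd.toList.length spans j hj
  have hB := segB_eq_segF cmd.toList spans _ hcov cmd.toList.length 0 [0] (by omega)
  rw [List.drop_zero] at hB
  have hA := segA_eq_segF cmd.toList spans cmd.toList.length 0 [0] (by omega)
  rw [show ((0 : Nat) : Int) = 0 by simp] at hB
  rw [hA, ← hB]
  rw [segA_pick_eq0]
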